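-- pv_equiv track=rewrite | github.com/NicolasFecko/AlterAI_Remake | Alter.py | update_summary
-- ===== SOURCE A (Python) =====
-- SUMMARY_MAX_LENGTH = 1000  # max characters for summary
--
-- def update_summary(memory, max_length=SUMMARY_MAX_LENGTH):
--     if len(memory) <= 6:
--         return ""
--
--     # Only include messages that have both 'user' and 'assistant'
--     older_msgs = [m for m in memory[:-6] if "user" in m and "assistant" in m]
--
--     summary_parts = []
--     for msg in older_msgs:
--         role_tag = msg.get("role", "conversation").upper()
--         user_text = msg.get("user", "")
--         assistant_text = msg.get("assistant", "")
--         summary_parts.append(f"[{role_tag}] U:{user_text} A:{assistant_text}")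
--
--         if sum(len(p) for p in summary_parts) > max_length:
--             break
--
--     summary_text = " ".join(summary_parts)
--     if len(summary_text) > max_length:
--         summary_text = summary_text[:max_length] + "..."
--     return summary_text.strip()
-- ===== SOURCE B (Python) =====
-- SUMMARY_MAX_LENGTH = 1000  # max characters for summary
--
-- def update_summary(memory, max_length=SUMMARY_MAX_LENGTH):
--     if len(memory) <= 6:
--         return ""
--     # format every qualifying older message up front
--     parts = [
--         f"[{m.get('role', 'conversation').upper()}] U:{m.get('user', '')} A:{m.get('assistant', '')}"
--         for m in memory[:-6]
--         if "user" in m and "assistant" in m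
--     ]
--     # cumulative part-length totals, then the first index whose total exceeds the cap
--     cum = []
--     t = 0
--     for p in parts:
--         t += len(p)
--         cum.append(t)
--     keep = next((i + 1 for i, c in enumerate(cum) if c > max_length), len(parts))
--     text = " ".join(parts[:keep])
--     if len(text) > max_length:
--         text = text[:max_length] + "..."
--     return text.strip()
-- ===== Notes on version B (the rewrite author's own statement) =====
-- stated objective: alternative
-- what changed: Replaces A's single early-breaking loop (which re-sums all part lengths on every iteration) with a format-everything comprehension, a one-pass cumulative-length table, and an index lookup for the cutoff.
import Mathlib
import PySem

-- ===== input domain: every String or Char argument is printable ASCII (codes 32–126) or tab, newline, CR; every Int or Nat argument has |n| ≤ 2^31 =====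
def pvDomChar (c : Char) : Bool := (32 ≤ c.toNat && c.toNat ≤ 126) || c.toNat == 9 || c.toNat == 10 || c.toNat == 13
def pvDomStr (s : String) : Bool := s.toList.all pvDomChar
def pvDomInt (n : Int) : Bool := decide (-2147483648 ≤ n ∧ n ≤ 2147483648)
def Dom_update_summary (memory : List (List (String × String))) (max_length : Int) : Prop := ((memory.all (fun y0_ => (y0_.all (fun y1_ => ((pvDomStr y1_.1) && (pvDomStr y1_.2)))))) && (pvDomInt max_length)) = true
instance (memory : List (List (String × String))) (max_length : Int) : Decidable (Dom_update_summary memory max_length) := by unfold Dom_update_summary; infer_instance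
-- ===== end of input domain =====

-- B replaces A's early-breaking loop (which re-sums all part lengths on every iteration) with a
-- format-everything comprehension, a cumulative-length table, and an index lookup for the cutoff.

-- ===== PORT A =====
-- f"[{role_tag}] U:{user_text} A:{assistant_text}" for one message (formatting shared by both Pythons)
def pvFmt (m : List (String × String)) : String :=
  "[" ++ PySem.Str.upper ((PySem.Dict.mk m).getD "role" "conversation") ++ "] U:" ++
    (PySem.Dict.mk m).getD "user" "" ++ " A:" ++ (PySem.Dict.mk m).getD "assistant" ""

-- "user" in m and "assistant" in m
def pvQual (m : List (String × String)) : Bool :=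
  (PySem.Dict.mk m).contains "user" && (PySem.Dict.mk m).contains "assistant"

-- sum(len(p) for p in summary_parts)
def pvSumLens (ps : List String) : Int := ps.foldl (fun s p => s + PySem.Str.len p) 0

-- A's for-loop over older_msgs with its break, carrying summary_parts
def pvALoop (max_length : Int) : List (List (String × String)) → List String → List String
  | [], parts => parts
  | m :: rest, parts =>
      let parts' := parts ++ [pvFmt m]
      if pvSumLens parts' > max_length then parts'
      else pvALoop max_length rest parts'

def update_summary (memory : List (List (String × String))) (max_length : Int) : String :=
  if memory.length ≤ 6 then "" else
  let older_msgs := (PySem.List.slice memory none (some (-6))).filter pvQual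
  let summary_parts := pvALoop max_length older_msgs []
  let summary_text := PySem.Str.join " " summary_parts
  let summary_text :=
    if PySem.Str.len summary_text > max_length then
      PySem.Str.slice summary_text none (some max_length) ++ "..."
    else summary_text
  PySem.Str.strip summary_text

-- ===== PORT B =====
-- B's cum/t loop building the cumulative part-length totals
def pvCumLoop : List Int → List Int × Int → List Int × Int
  | [], acc => acc
  | n :: rest, (cum, t) => pvCumLoop rest (cum ++ [t + n], t + n)

def update_summary_alt (memory : List (List (String × String))) (max_length : Int) : String :=
  if memory.length ≤ 6 then "" else
  let parts := ((PySem.List.slice memory none (some (-6))).filter pvQual).map pvFmt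
  let cum := (pvCumLoop (parts.map PySem.Str.len) ([], 0)).1
  let keep : Int :=
    match (PySem.List.enumerate cum 0).find? (fun q => decide (q.2 > max_length)) with
    | some q => q.1 + 1
    | none => (parts.length : Int)
  let text := PySem.Str.join " " (PySem.List.slice parts none (some keep))
  let text :=
    if PySem.Str.len text > max_length then
      PySem.Str.slice text none (some max_length) ++ "..."
    else text
  PySem.Str.strip text

-- ===== PRECONDITION & SPEC =====
def Spec_update_summary (memory : List (List (String × String))) (max_length : Int) (out : String) : Prop := out = update_summary_alt memory max_length
instance (memory : List (List (String × String))) (max_length : Int) (out : String) : Decidable (Spec_update_summary memory max_length out) := by unfold Spec_update_summary; infer_instance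

-- ===== CLAIM (what is proved, stated in full; the proofs are below) =====
def Claim_equal_update_summary : Prop := ∀ (memory : List (List (String × String))) (max_length : Int), Dom_update_summary memory max_length → Spec_update_summary memory max_length (update_summary memory max_length)

-- ===== LEMMAS AND PROOFS =====

-- number of parts the cap keeps: everything up to and including the first part whose running total exceeds ml
def pvKeepNat (ml : Int) : Int → List String → Nat
  | _, [] => 0
  | t, p :: rest => if t + PySem.Str.len p > ml then 1 else 1 + pvKeepNat ml (t + PySem.Str.len p) rest

-- running cumulative totals starting at t (what B's cum loop produces)
def pvCum : Int → List Int → List Int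
  | _, [] => []
  | t, n :: rest => (t + n) :: pvCum (t + n) rest

theorem pvSumLens_append_singleton (ps : List String) (p : String) :
    pvSumLens (ps ++ [p]) = pvSumLens ps + PySem.Str.len p := by
  simp [pvSumLens]

-- A's break loop keeps exactly the first pvKeepNat formatted parts
theorem pvALoop_eq_take (ml : Int) (msgs : List (List (String × String))) (acc : List String) :
    pvALoop ml msgs acc = acc ++ (msgs.map pvFmt).take (pvKeepNat ml (pvSumLens acc) (msgs.map pvFmt)) := by
  induction msgs generalizing acc with
  | nil => simp [pvALoop, pvKeepNat]
  | cons m rest ih =>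
    rw [pvALoop, pvSumLens_append_singleton]
    by_cases h : pvSumLens acc + PySem.Str.len (pvFmt m) > ml
    · rw [if_pos h]
      simp only [List.map_cons, pvKeepNat, if_pos h, List.take_succ_cons, List.take_zero]
    · rw [if_neg h, ih, pvSumLens_append_singleton]
      simp only [List.map_cons, pvKeepNat, if_neg h, Nat.add_comm 1, List.take_succ_cons,
        List.append_assoc, List.singleton_append]

theorem pvCumLoop_eq (lens : List Int) (cum : List Int) (t : Int) :
    pvCumLoop lens (cum, t) = (cum ++ pvCum t lens, t + lens.sum) := by
  induction lens generalizing cum t with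
  | nil => simp [pvCumLoop, pvCum]
  | cons n rest ih =>
    simp only [pvCumLoop, pvCum, ih, List.append_assoc, List.singleton_append, List.sum_cons]
    rw [add_assoc]

-- B's first-index scan over the cumulative totals computes pvKeepNat
theorem pvFind_keep (ml : Int) (ps : List String) (t : Int) (s : Int) :
    (match (PySem.List.enumerate (pvCum t (ps.map PySem.Str.len)) s).find?
        (fun q => decide (q.2 > ml)) with
     | some q => q.1 + 1
     | none => s + (ps.length : Int)) = s + (pvKeepNat ml t ps : Int) := by
  induction ps generalizing t s with
  | nil => simp [pvCum, pvKeepNat]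
  | cons p rest ih =>
    have ih' := ih (t + PySem.Str.len p) (s + 1)
    simp only [List.map_cons, pvCum, PySem.List.enumerate_cons]
    by_cases h : t + PySem.Str.len p > ml
    · rw [List.find?_cons_of_pos (by simpa using h)]
      simp only [pvKeepNat, if_pos h]
      norm_num
    · rw [List.find?_cons_of_neg (by simpa using h)]
      simp only [pvKeepNat, if_neg h, List.length_cons]
      cases hf : (PySem.List.enumerate (pvCum (t + PySem.Str.len p) (rest.map PySem.Str.len)) (s + 1)).find?
          (fun q => decide (q.2 > ml)) with
      | none =>
        rw [hf] at ih'
        simp at ih' ⊢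
        omega
      | some q =>
        rw [hf] at ih'
        simp at ih' ⊢
        omega

theorem pvFind_keep0 (ml : Int) (ps : List String) :
    (match (PySem.List.enumerate (pvCum 0 (ps.map PySem.Str.len)) 0).find?
        (fun q => decide (q.2 > ml)) with
     | some q => q.1 + 1
     | none => (ps.length : Int)) = (pvKeepNat ml 0 ps : Int) := by
  have h := pvFind_keep ml ps 0 0
  cases hf : (PySem.List.enumerate (pvCum 0 (ps.map PySem.Str.len)) 0).find?
      (fun q => decide (q.2 > ml)) with
  | none => rw [hf] at h; simp at h ⊢; omega
  | some q => rw [hf] at h; simp at h ⊢; omega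

-- ===== VERDICT (by name: the statement is the Claim_ definition above) =====
theorem update_summary_spec : Claim_equal_update_summary := by
  intro memory ml _
  simp only [Spec_update_summary, update_summary, update_summary_alt]
  by_cases hlen : memory.length ≤ 6
  · rw [if_pos hlen, if_pos hlen]
  · rw [if_neg hlen, if_neg hlen]
    set older := (PySem.List.slice memory none (some (-6))).filter pvQual with holder
    set parts := older.map pvFmt with hp
    have hA : pvALoop ml older [] = parts.take (pvKeepNat ml 0 parts) := by
      simpa [pvSumLens] using pvALoop_eq_take ml older []
    have hcum : (pvCumLoop (parts.map PySem.Str.len) ([], 0)).1 = pvCum 0 (parts.map PySem.Str.len) := by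
      rw [pvCumLoop_eq]; simp
    rw [hA, hcum, pvFind_keep0 ml parts, PySem.List.slice_to_natCast]
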